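-- pv_equiv track=rewrite | github.com/olivierC80/Semantic | rendus/2025/generateHtml3.py | paginate_cells
-- ===== SOURCE A (Python) =====
-- def paginate_cells(code_cells, max_lines=45, n_cols=3):
--     """
--     Crée les pages en Python selon la contrainte :
--     - chaque page a n_cols colonnes
--     - chaque colonne contient des cellules entières sans dépasser max_lines
--     Retourne une liste de pages, où chaque page est
--     { 'cols': [ [cell1, cell2, ...], [...], [...] ] }
--     """
--     pages = []
--     current_page = {'cols': [[] for _ in range(n_cols)]}
--     col_heights = [0] * n_cols
--     col_idx = 0
--
--     for cell in code_cells: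
--         length = len(cell)
--         # Cas d'une cellule très longue
--         if length > max_lines:
--             if any(current_page['cols'][ci] for ci in range(n_cols)):
--                 pages.append(current_page)
--                 current_page = {'cols': [[] for _ in range(n_cols)]}
--                 col_heights = [0] * n_cols
--                 col_idx = 0
--             current_page['cols'][0].append(cell)
--             pages.append(current_page)
--             current_page = {'cols': [[] for _ in range(n_cols)]}
--             col_heights = [0] * n_cols
--             col_idx = 0
--             continue
--
--         # Placement normal
--         if col_heights[col_idx] + length <= max_lines:
--             current_page['cols'][col_idx].append(cell)
--             col_heights[col_idx] += length
--         else: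
--             col_idx += 1
--             if col_idx >= n_cols:
--                 pages.append(current_page)
--                 current_page = {'cols': [[] for _ in range(n_cols)]}
--                 col_heights = [0] * n_cols
--                 col_idx = 0
--             current_page['cols'][col_idx].append(cell)
--             col_heights[col_idx] += length
--
--     if any(current_page['cols'][ci] for ci in range(n_cols)):
--         pages.append(current_page)
--
--     return pages
-- ===== SOURCE B (Python) =====
-- def paginate_cells(code_cells, max_lines=45, n_cols=3):
--     # Phase 1: split the cells into a flat list of columns; a column is
--     # (is_long, cells). A cell longer than max_lines closes the current
--     # column and becomes its own flagged column.
--     columns = []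
--     cur, h = [], 0
--     for cell in code_cells:
--         if len(cell) > max_lines:
--             if cur:
--                 columns.append((False, cur))
--                 cur, h = [], 0
--             columns.append((True, [cell]))
--         elif cur and h + len(cell) > max_lines:
--             columns.append((False, cur))
--             cur, h = [cell], len(cell)
--         else:
--             cur.append(cell)
--             h += len(cell)
--     if cur:
--         columns.append((False, cur))
--
--     # Phase 2: group columns into pages of n_cols columns, padding with
--     # empty columns; a flagged column flushes the pending group and gets
--     # a page of its own.
--     pages = []
--     group = []
--     def emit(g):
--         pages.append({'cols': g + [[] for _ in range(n_cols - len(g))]})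
--     for is_long, col in columns:
--         if is_long:
--             if group:
--                 emit(group)
--                 group = []
--             emit([col])
--         else:
--             group.append(col)
--             if len(group) == n_cols:
--                 emit(group)
--                 group = []
--     if group:
--         emit(group)
--     return pages
-- ===== Notes on version B (the rewrite author's own statement) =====
-- stated objective: alternative
-- what changed: Replaces A's single-pass state machine over a mutable fixed-width page (cols/col_heights/col_idx, flush-on-overflow) by a two-phase pipeline: first split the cells into a flat list of (long?, column) runs under the line limit, then group those columns into pages of n_cols with padding, flushing on flagged long-cell columns.
-- outside the precondition, e.g. on paginate_cells([['a']], 5, 0): A raises IndexError, B returns [{'cols': [[['a']]]}]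
import Mathlib
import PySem

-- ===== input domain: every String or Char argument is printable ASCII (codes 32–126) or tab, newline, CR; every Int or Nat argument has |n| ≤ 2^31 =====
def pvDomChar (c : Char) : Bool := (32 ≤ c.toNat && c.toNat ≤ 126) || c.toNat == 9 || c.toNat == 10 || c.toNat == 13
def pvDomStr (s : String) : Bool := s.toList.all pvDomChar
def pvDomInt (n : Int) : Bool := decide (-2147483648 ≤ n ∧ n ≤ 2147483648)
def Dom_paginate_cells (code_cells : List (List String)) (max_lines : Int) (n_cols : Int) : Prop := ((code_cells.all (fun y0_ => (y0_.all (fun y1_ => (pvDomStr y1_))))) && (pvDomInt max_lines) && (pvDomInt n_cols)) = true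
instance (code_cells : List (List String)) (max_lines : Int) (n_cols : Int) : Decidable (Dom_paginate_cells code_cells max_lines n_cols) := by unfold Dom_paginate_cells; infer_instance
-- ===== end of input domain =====

-- B replaces A's single-pass mutable page/col_heights/col_idx state machine by a
-- two-phase pipeline (split cells into a flat column list, then group columns into
-- pages); objective: alternative decomposition, same asymptotic cost.

-- ===== PORT A =====
-- page = {'cols': cols} as an association list
def pvMkPage (cols : List (List (List String))) : List (String × List (List (List String))) :=
  [("cols", cols)]

-- any(current_page['cols'][ci] for ci in range(n_cols))
def pvAnyNonempty (n_cols : Int) (cols : List (List (List String))) : Bool :=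
  (List.range n_cols.toNat).any (fun ci => !(cols.getD ci []).isEmpty)

-- A's state: (pages, current page cols, col_heights, col_idx)
abbrev PvASt := List (List (String × List (List (List String)))) ×
  List (List (List String)) × List Int × Nat

def pvAStep (max_lines n_cols : Int) (st : PvASt) (cell : List String) : PvASt :=
  let pages := st.1
  let cols := st.2.1
  let heights := st.2.2.1
  let colIdx := st.2.2.2
  let length : Int := cell.length
  if length > max_lines then
    -- flush the current page if it has anything, then a solo page for the cell
    let st1 : PvASt :=
      if pvAnyNonempty n_cols cols then
        (pages ++ [pvMkPage cols], List.replicate n_cols.toNat [],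
         List.replicate n_cols.toNat (0 : Int), 0)
      else (pages, cols, heights, colIdx)
    let cols1 := st1.2.1.set 0 ((st1.2.1.getD 0 []) ++ [cell])
    (st1.1 ++ [pvMkPage cols1], List.replicate n_cols.toNat [],
     List.replicate n_cols.toNat (0 : Int), 0)
  else
    if heights.getD colIdx 0 + length ≤ max_lines then
      (pages, cols.set colIdx ((cols.getD colIdx []) ++ [cell]),
       heights.set colIdx (heights.getD colIdx 0 + length), colIdx)
    else
      let colIdx1 := colIdx + 1
      let st1 : PvASt :=
        if (colIdx1 : Int) ≥ n_cols then
          (pages ++ [pvMkPage cols], List.replicate n_cols.toNat [],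
           List.replicate n_cols.toNat (0 : Int), 0)
        else (pages, cols, heights, colIdx1)
      (st1.1, st1.2.1.set st1.2.2.2 ((st1.2.1.getD st1.2.2.2 []) ++ [cell]),
       st1.2.2.1.set st1.2.2.2 (st1.2.2.1.getD st1.2.2.2 0 + length), st1.2.2.2)

def paginate_cells (code_cells : List (List String)) (max_lines : Int) (n_cols : Int) : List (List (String × List (List (List String)))) :=
  let st := code_cells.foldl (pvAStep max_lines n_cols)
    ([], List.replicate n_cols.toNat [], List.replicate n_cols.toNat (0 : Int), 0)
  if pvAnyNonempty n_cols st.2.1 then st.1 ++ [pvMkPage st.2.1] else st.1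

-- ===== PORT B =====
-- Phase-1 state: (columns built so far, current column, its height)
abbrev PvB1St := List (Bool × List (List String)) × List (List String) × Int

def pvBStep1 (max_lines : Int) (st : PvB1St) (cell : List String) : PvB1St :=
  let columns := st.1
  let cur := st.2.1
  let h := st.2.2
  if (cell.length : Int) > max_lines then
    let columns1 := if cur.isEmpty then columns else columns ++ [(false, cur)]
    (columns1 ++ [(true, [cell])], [], 0)
  else if !cur.isEmpty && decide (h + cell.length > max_lines) then
    (columns ++ [(false, cur)], [cell], (cell.length : Int))
  else
    (columns, cur ++ [cell], h + cell.length)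

-- emit(g): page with g padded by empty columns to n_cols
def pvEmit (n_cols : Int) (g : List (List (List String))) : List (String × List (List (List String))) :=
  [("cols", g ++ List.replicate (n_cols - (g.length : Int)).toNat [])]

-- Phase-2 state: (pages, pending group)
abbrev PvB2St := List (List (String × List (List (List String)))) × List (List (List String))

def pvBStep2 (n_cols : Int) (st : PvB2St) (c : Bool × List (List String)) : PvB2St :=
  if c.1 then
    let st1 : PvB2St := if st.2.isEmpty then st else (st.1 ++ [pvEmit n_cols st.2], [])
    (st1.1 ++ [pvEmit n_cols [c.2]], [])
  else
    let g := st.2 ++ [c.2]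
    if (g.length : Int) = n_cols then (st.1 ++ [pvEmit n_cols g], []) else (st.1, g)

def paginate_cells_alt (code_cells : List (List String)) (max_lines : Int) (n_cols : Int) : List (List (String × List (List (List String)))) :=
  let p1 := code_cells.foldl (pvBStep1 max_lines) ([], [], 0)
  let columns := if p1.2.1.isEmpty then p1.1 else p1.1 ++ [(false, p1.2.1)]
  let p2 := columns.foldl (pvBStep2 n_cols) ([], [])
  if p2.2.isEmpty then p2.1 else p2.1 ++ [pvEmit n_cols p2.2]

-- ===== PRECONDITION & SPEC =====
-- Pre_ excludes n_cols ≤ 0 with a nonempty cell list: there A raises IndexError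
-- (cols[0] / col_heights[0] on the zero-width page), not a value.
def Pre_paginate_cells (code_cells : List (List String)) (max_lines : Int) (n_cols : Int) : Prop :=
  1 ≤ n_cols ∨ code_cells = []
instance (code_cells : List (List String)) (max_lines : Int) (n_cols : Int) : Decidable (Pre_paginate_cells code_cells max_lines n_cols) := by unfold Pre_paginate_cells; infer_instance

def pvWitness_paginate_cells : List (List String) × Int × Int := ([[ "a", "b" ], [ "c" ]], 2, 2)

def Spec_paginate_cells (code_cells : List (List String)) (max_lines : Int) (n_cols : Int) (out : List (List (String × List (List (List String))))) : Prop := out = paginate_cells_alt code_cells max_lines n_cols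
instance (code_cells : List (List String)) (max_lines : Int) (n_cols : Int) (out : List (List (String × List (List (List String))))) : Decidable (Spec_paginate_cells code_cells max_lines n_cols out) := by unfold Spec_paginate_cells; infer_instance

-- ===== CLAIM (what is proved, stated in full; the proofs are below) =====
def Claim_equal_paginate_cells : Prop := ∀ (code_cells : List (List String)) (max_lines : Int) (n_cols : Int), Dom_paginate_cells code_cells max_lines n_cols → Pre_paginate_cells code_cells max_lines n_cols → Spec_paginate_cells code_cells max_lines n_cols (paginate_cells code_cells max_lines n_cols)

-- ===== LEMMAS AND PROOFS =====

-- proof-only abstractions: B's phase-2 run, and the A-state represented by B's state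
def pvHsum (c : List (List String)) : Int := (c.map (fun x => (x.length : Int))).sum

def pvPad (n : Int) (g : List (List (List String))) : List (List (List String)) :=
  g ++ List.replicate (n.toNat - g.length) []

def pvPad0 (n : Int) (hs : List Int) : List Int :=
  hs ++ List.replicate (n.toNat - hs.length) 0

def pvPhase2 (n : Int) (columns : List (Bool × List (List String))) : PvB2St :=
  columns.foldl (pvBStep2 n) ([], [])

def pvAbs (n : Int) (pg : PvB2St) (cur : List (List String)) : PvASt :=
  (pg.1, pvPad n (pg.2 ++ [cur]), pvPad0 n ((pg.2 ++ [cur]).map pvHsum), pg.2.length)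

def pvInv (n : Int) (columns : List (Bool × List (List String)))
    (cur : List (List String)) (h : Int) : Prop :=
  ((pvPhase2 n columns).2.length : Int) + 1 ≤ n ∧
  (∀ c ∈ (pvPhase2 n columns).2, c ≠ []) ∧
  (cur = [] → (pvPhase2 n columns).2 = []) ∧
  h = pvHsum cur

lemma pv_getD_len {α : Type} (xs : List α) (c : α) (rest : List α) (d : α) :
    (xs ++ c :: rest).getD xs.length d = c := by
  induction xs with
  | nil => rfl
  | cons x xs ih => simpa using ih

lemma pv_set_len {α : Type} (xs : List α) (c : α) (rest : List α) (x : α) :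
    (xs ++ c :: rest).set xs.length x = xs ++ x :: rest := by
  induction xs with
  | nil => rfl
  | cons y xs ih => simpa using ih

lemma pv_any_range_getD (xs : List (List (List String))) :
    ((List.range xs.length).any fun i => !(xs.getD i []).isEmpty)
      = xs.any fun c => !c.isEmpty := by
  induction xs with
  | nil => rfl
  | cons x xs ih =>
    simp only [List.length_cons, List.range_succ_eq_map, List.any_cons, List.any_map,
      Function.comp_def, List.getD_cons_zero, List.getD_cons_succ]
    rw [ih]

lemma pv_any_replicate_false (k : Nat) :
    ((List.replicate k ([] : List (List String))).any fun c => !c.isEmpty) = false := by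
  induction k with
  | zero => rfl
  | succ k ih => simpa [List.replicate_succ] using ih

lemma pv_cons_replicate {α : Type} (a : α) (k : Nat) (hk : 1 ≤ k) :
    a :: List.replicate (k - 1) a = List.replicate k a := by
  cases k with
  | zero => omega
  | succ k => simp [List.replicate_succ]

lemma pvPad_shape (n : Int) (G : List (List (List String))) (cur : List (List String)) :
    pvPad n (G ++ [cur]) = G ++ cur :: List.replicate (n.toNat - (G.length + 1)) [] := by
  simp [pvPad]

lemma pvPad0_shape (n : Int) (G : List (List (List String))) (cur : List (List String)) :
    pvPad0 n ((G ++ [cur]).map pvHsum)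
      = G.map pvHsum ++ pvHsum cur :: List.replicate (n.toNat - (G.length + 1)) 0 := by
  simp [pvPad0]

lemma pv_any_pad (n : Int) (G : List (List (List String))) (cur : List (List String))
    (hlen : (G.length : Int) + 1 ≤ n) (hne : ∀ c ∈ G, c ≠ []) :
    pvAnyNonempty n (pvPad n (G ++ [cur])) = !(G.isEmpty && cur.isEmpty) := by
  have hlen' : (pvPad n (G ++ [cur])).length = n.toNat := by
    simp [pvPad]; omega
  unfold pvAnyNonempty
  rw [← hlen', pv_any_range_getD]
  rw [pvPad_shape]

  simp only [List.any_append, List.any_cons, pv_any_replicate_false, Bool.or_false]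
  cases G with
  | nil => simp
  | cons g gs =>
    have : g ≠ [] := hne g (by simp)
    simp [List.isEmpty_iff, this]

lemma pvMkPage_pad (n : Int) (g : List (List (List String)))
    (hg : (g.length : Int) ≤ n) :
    pvMkPage (pvPad n g) = pvEmit n g := by
  unfold pvMkPage pvEmit pvPad
  have : (n - (g.length : Int)).toNat = n.toNat - g.length := by omega
  rw [this]

lemma pvPad_nil (n : Int) (hn : 1 ≤ n) :
    pvPad n [([] : List (List String))] = List.replicate n.toNat [] := by
  unfold pvPad
  simp only [List.length_cons, List.length_nil]
  rw [List.singleton_append, pv_cons_replicate _ _ (by omega)]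

lemma pvPad0_nil (n : Int) (hn : 1 ≤ n) :
    pvPad0 n [(0 : Int)] = List.replicate n.toNat 0 := by
  unfold pvPad0
  simp only [List.length_cons, List.length_nil]
  rw [List.singleton_append, pv_cons_replicate _ _ (by omega)]

lemma pvHsum_append (c : List (List String)) (cell : List String) :
    pvHsum (c ++ [cell]) = pvHsum c + cell.length := by
  simp [pvHsum]

lemma pvPhase2_append (n : Int) (columns L : List (Bool × List (List String))) :
    pvPhase2 n (columns ++ L) = L.foldl (pvBStep2 n) (pvPhase2 n columns) := by
  simp [pvPhase2, List.foldl_append]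

lemma pv_fresh_set (n : Int) (hn : 1 ≤ n) (cell : List String) :
    (List.replicate n.toNat ([] : List (List String))).set 0
        ((List.replicate n.toNat ([] : List (List String))).getD 0 [] ++ [cell])
      = pvPad n [[cell]] := by
  have h1 : List.replicate n.toNat ([] : List (List String))
      = [] :: List.replicate (n.toNat - 1) [] := (pv_cons_replicate _ _ (by omega)).symm
  rw [h1]
  simp [pvPad]

lemma pv_fresh_hset (n : Int) (hn : 1 ≤ n) (len : Int) :
    (List.replicate n.toNat (0 : Int)).set 0
        ((List.replicate n.toNat (0 : Int)).getD 0 0 + len)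
      = pvPad0 n [len] := by
  have h1 : List.replicate n.toNat (0 : Int)
      = 0 :: List.replicate (n.toNat - 1) 0 := (pv_cons_replicate _ _ (by omega)).symm
  rw [h1]
  simp [pvPad0]

lemma pv_any_replicate_nonempty (n : Int) (k : Nat) :
    pvAnyNonempty n (List.replicate k ([] : List (List String))) = false := by
  unfold pvAnyNonempty
  rw [List.any_eq_false]
  intro i _
  simp only [List.getD_eq_getElem?_getD, List.getElem?_replicate]
  split <;> simp

lemma pvPhase2_def (n : Int) (L : List (Bool × List (List String))) :
    List.foldl (pvBStep2 n) ([], []) L = pvPhase2 n L := rfl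

lemma pv_cols_append (n : Int) (G : List (List (List String))) (cur : List (List String))
    (cell : List String) :
    (pvPad n (G ++ [cur])).set G.length ((pvPad n (G ++ [cur])).getD G.length [] ++ [cell])
      = pvPad n (G ++ [cur ++ [cell]]) := by
  rw [pvPad_shape, pvPad_shape, pv_getD_len, pv_set_len]

lemma pv_heights_append (n : Int) (G : List (List (List String))) (cur : List (List String))
    (cell : List String) :
    (pvPad0 n ((G ++ [cur]).map pvHsum)).set G.length (pvHsum cur + (cell.length : Int))
      = pvPad0 n ((G ++ [cur ++ [cell]]).map pvHsum) := by
  rw [pvPad0_shape, pvPad0_shape]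
  have h2 := pv_set_len (G.map pvHsum) (pvHsum cur)
    (List.replicate (n.toNat - (G.length + 1)) 0) (pvHsum cur + (cell.length : Int))
  simp only [List.length_map] at h2
  rw [h2, pvHsum_append]

lemma pv_cols_push (n : Int) (G : List (List (List String))) (cur : List (List String))
    (cell : List String) (hk : (G.length : Int) + 2 ≤ n) :
    (pvPad n (G ++ [cur])).set (G.length + 1) ((pvPad n (G ++ [cur])).getD (G.length + 1) [] ++ [cell])
      = pvPad n (G ++ [cur] ++ [[cell]]) := by
  have hrep : List.replicate (n.toNat - (G.length + 1)) ([] : List (List String))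
      = [] :: List.replicate (n.toNat - (G.length + 2)) [] := by
    rw [show n.toNat - (G.length + 2) = n.toNat - (G.length + 1) - 1 by omega]
    exact (pv_cons_replicate _ _ (by omega)).symm
  rw [pvPad_shape, hrep]
  have hsh : G ++ cur :: [] :: List.replicate (n.toNat - (G.length + 2)) ([] : List (List String))
      = (G ++ [cur]) ++ [] :: List.replicate (n.toNat - (G.length + 2)) [] := by simp
  rw [hsh]
  have hl : G.length + 1 = (G ++ [cur]).length := by simp
  rw [hl, pv_getD_len, pv_set_len]
  simp [pvPad]

lemma pv_heights_push (n : Int) (G : List (List (List String))) (cur : List (List String))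
    (cell : List String) (hk : (G.length : Int) + 2 ≤ n) :
    (pvPad0 n ((G ++ [cur]).map pvHsum)).set (G.length + 1)
        ((pvPad0 n ((G ++ [cur]).map pvHsum)).getD (G.length + 1) 0 + (cell.length : Int))
      = pvPad0 n ((G ++ [cur] ++ [[cell]]).map pvHsum) := by
  have hrep : List.replicate (n.toNat - (G.length + 1)) (0 : Int)
      = 0 :: List.replicate (n.toNat - (G.length + 2)) 0 := by
    rw [show n.toNat - (G.length + 2) = n.toNat - (G.length + 1) - 1 by omega]
    exact (pv_cons_replicate _ _ (by omega)).symm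
  rw [pvPad0_shape, hrep]
  have hsh : G.map pvHsum ++ pvHsum cur :: (0 : Int) :: List.replicate (n.toNat - (G.length + 2)) 0
      = (G.map pvHsum ++ [pvHsum cur]) ++ (0 : Int) :: List.replicate (n.toNat - (G.length + 2)) 0 := by
    simp
  rw [hsh]
  have hl : G.length + 1 = (G.map pvHsum ++ [pvHsum cur]).length := by simp
  rw [hl, pv_getD_len, pv_set_len]
  simp [pvPad0, pvHsum]

lemma pv_inv_reset (n : Int) (hn : 1 ≤ n) (columns : List (Bool × List (List String)))
    (hG : (pvPhase2 n columns).2 = []) : pvInv n columns [] 0 := by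
  refine ⟨?_, ?_, ?_, ?_⟩ <;> simp [hG, pvHsum]
  omega

-- one simulation step: A's transition on the abstracted state matches B's phase-1 step
lemma pv_step_sim (m n : Int) (hn : 1 ≤ n)
    (columns : List (Bool × List (List String))) (cur : List (List String)) (h : Int)
    (cell : List String) (inv : pvInv n columns cur h) :
    pvAStep m n (pvAbs n (pvPhase2 n columns) cur) cell
      = pvAbs n (pvPhase2 n ((pvBStep1 m (columns, cur, h) cell).1))
          ((pvBStep1 m (columns, cur, h) cell).2.1)
    ∧ pvInv n ((pvBStep1 m (columns, cur, h) cell).1)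
        ((pvBStep1 m (columns, cur, h) cell).2.1)
        ((pvBStep1 m (columns, cur, h) cell).2.2) := by
  obtain ⟨hlen, hne, hcur0, hh⟩ := inv
  by_cases hlong : (cell.length : Int) > m
  · -- long cell
    by_cases hc : cur = []
    · subst hc
      have hG : (pvPhase2 n columns).2 = [] := hcur0 rfl
      have hX : pvBStep1 m (columns, [], h) cell = (columns ++ [(true, [cell])], [], 0) := by
        simp [pvBStep1, hlong]
      rw [hX]
      constructor
      · rw [pvPhase2_append n columns [(true, [cell])]]
        simp only [List.foldl_cons, List.foldl_nil, pvBStep2]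
        simp only [pvAStep, pvAbs, hG, List.nil_append]
        rw [pvPad_nil n hn]
        simp only [pv_any_replicate_nonempty, Bool.false_eq_true, if_false, if_pos hlong]
        rw [pv_fresh_set n hn cell, pvMkPage_pad n [[cell]] (by simp; omega)]
        simp [pvAbs, pvPad_nil n hn, pvPad0_nil n hn, pvHsum]
      · exact pv_inv_reset n hn _ (by rw [pvPhase2_append]; simp [pvBStep2])
    · have hcb : cur.isEmpty = false := by simpa [List.isEmpty_iff] using hc
      have hX : pvBStep1 m (columns, cur, h) cell
          = (columns ++ [(false, cur), (true, [cell])], [], 0) := by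
        simp [pvBStep1, hlong, hcb]
      rw [hX]
      have hany : pvAnyNonempty n (pvPad n ((pvPhase2 n columns).2 ++ [cur])) = true := by
        rw [pv_any_pad n _ _ hlen hne]; simp [hc]
      constructor
      · rw [pvPhase2_append n columns [(false, cur), (true, [cell])]]
        simp only [List.foldl_cons, List.foldl_nil, pvBStep2]
        simp only [pvAStep, pvAbs, hany, if_true, if_pos hlong]
        rw [pv_fresh_set n hn cell, pvMkPage_pad n [[cell]] (by simp; omega),
          pvMkPage_pad n _ (by simp; omega)]
        by_cases hfull : (((pvPhase2 n columns).2.length : Int) + 1 = n)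
        · simp [hfull, hcb, pvAbs, pvPad_nil n hn, pvPad0_nil n hn, pvHsum]
        · simp [hfull, hcb, pvAbs, pvPad_nil n hn, pvPad0_nil n hn, pvHsum]
      · refine pv_inv_reset n hn _ ?_
        rw [pvPhase2_append]
        simp [pvBStep2]
  · -- normal cell
    push_neg at hlong
    have hgetD : (pvPad0 n (((pvPhase2 n columns).2 ++ [cur]).map pvHsum)).getD
        (pvPhase2 n columns).2.length 0 = pvHsum cur := by
      rw [pvPad0_shape]
      have := pv_getD_len ((pvPhase2 n columns).2.map pvHsum) (pvHsum cur)
        (List.replicate (n.toNat - ((pvPhase2 n columns).2.length + 1)) 0) 0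
      simpa using this
    by_cases hfit : pvHsum cur + (cell.length : Int) ≤ m
    · -- fits in the current column
      have hX : pvBStep1 m (columns, cur, h) cell = (columns, cur ++ [cell], h + cell.length) := by
        by_cases hc : cur = []
        · simp [pvBStep1, not_lt.mpr hlong, hc]
        · have hcb : cur.isEmpty = false := by simpa [List.isEmpty_iff] using hc
          have : ¬ (h + (cell.length : Int) > m) := by rw [hh]; omega
          simp [pvBStep1, not_lt.mpr hlong, hcb, this]
      rw [hX]
      constructor
      · simp only [pvAStep, pvAbs, hgetD, if_neg (not_lt.mpr hlong)]
        rw [if_pos (by omega : pvHsum cur + (cell.length : Int) ≤ m),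
          pv_cols_append, pv_heights_append n _ _ cell]
      · exact ⟨by simpa using hlen, by simpa using hne, by simp, by rw [hh, pvHsum_append]⟩
    · -- overflow to a new column
      have hc : cur ≠ [] := by
        intro hc; rw [hc] at hfit; simp [pvHsum] at hfit; omega
      have hcb : cur.isEmpty = false := by simpa [List.isEmpty_iff] using hc
      have hX : pvBStep1 m (columns, cur, h) cell
          = (columns ++ [(false, cur)], [cell], (cell.length : Int)) := by
        have : h + (cell.length : Int) > m := by rw [hh]; omega
        simp [pvBStep1, not_lt.mpr hlong, hcb, this]
      rw [hX]
      have hinv1 : ∀ c ∈ (pvPhase2 n columns).2 ++ [cur], c ≠ [] := by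
        intro c hmem
        rcases List.mem_append.mp hmem with h1 | h1
        · exact hne c h1
        · simp at h1; simpa [h1] using hc
      constructor
      · rw [pvPhase2_append n columns [(false, cur)]]
        simp only [List.foldl_cons, List.foldl_nil, pvBStep2]
        simp only [pvAStep, pvAbs, hgetD, if_neg (not_lt.mpr hlong)]
        rw [if_neg (by omega : ¬ (pvHsum cur + (cell.length : Int) ≤ m))]
        by_cases hfull : (((pvPhase2 n columns).2.length : Int) + 1 = n)
        · rw [if_pos (by push_cast; omega : ((((pvPhase2 n columns).2.length + 1 : Nat)) : Int) ≥ n)]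
          rw [pv_fresh_set n hn cell, pv_fresh_hset n hn, pvMkPage_pad n _ (by simp; omega)]
          simp [hfull, pvAbs, pvHsum]
        · rw [if_neg (by push_cast; omega : ¬ ((((pvPhase2 n columns).2.length + 1 : Nat)) : Int) ≥ n)]
          rw [pv_cols_push n _ _ cell (by omega), pv_heights_push n _ _ cell (by omega)]
          simp [hfull, pvAbs, pvHsum]
      · refine ⟨?_, ?_, ?_, ?_⟩
        · rw [pvPhase2_append n columns [(false, cur)]]
          simp only [List.foldl_cons, List.foldl_nil, pvBStep2]
          by_cases hfull : (((pvPhase2 n columns).2.length : Int) + 1 = n)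
          · simp [hfull]
            omega
          · simp [hfull]
            omega
        · rw [pvPhase2_append n columns [(false, cur)]]
          simp only [List.foldl_cons, List.foldl_nil, pvBStep2]
          by_cases hfull : (((pvPhase2 n columns).2.length : Int) + 1 = n)
          · simp [hfull]
          · simpa [hfull] using hinv1
        · simp
        · simp [pvHsum]

lemma pv_fold_sim (m n : Int) (hn : 1 ≤ n) (cc : List (List String)) :
    ∀ (columns : List (Bool × List (List String))) (cur : List (List String)) (h : Int),
      pvInv n columns cur h →
      cc.foldl (pvAStep m n) (pvAbs n (pvPhase2 n columns) cur)
        = pvAbs n (pvPhase2 n ((cc.foldl (pvBStep1 m) (columns, cur, h)).1))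
            ((cc.foldl (pvBStep1 m) (columns, cur, h)).2.1)
      ∧ pvInv n ((cc.foldl (pvBStep1 m) (columns, cur, h)).1)
          ((cc.foldl (pvBStep1 m) (columns, cur, h)).2.1)
          ((cc.foldl (pvBStep1 m) (columns, cur, h)).2.2) := by
  induction cc with
  | nil => intro columns cur h inv; exact ⟨rfl, inv⟩
  | cons cell cc ih =>
    intro columns cur h inv
    obtain ⟨heq, hinv⟩ := pv_step_sim m n hn columns cur h cell inv
    have := ih (pvBStep1 m (columns, cur, h) cell).1
      (pvBStep1 m (columns, cur, h) cell).2.1 (pvBStep1 m (columns, cur, h) cell).2.2 hinv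
    simpa [List.foldl_cons, heq] using this

-- A raises IndexError when n_cols ≤ 0 and there is a cell; B returns all cells
-- in unpadded pages there (outside Pre_, nothing is claimed)
lemma pv_main (cc : List (List String)) (m n : Int) (hpre : Pre_paginate_cells cc m n) :
    paginate_cells cc m n = paginate_cells_alt cc m n := by
  by_cases hn : 1 ≤ n
  · have hinv0 : pvInv n [] [] 0 := by
      refine ⟨?_, ?_, ?_, ?_⟩ <;> simp [pvPhase2, pvHsum]
      omega
    obtain ⟨heq, hinv⟩ := pv_fold_sim m n hn cc [] [] 0 hinv0
    have habs0 : (([], List.replicate n.toNat [], List.replicate n.toNat (0 : Int), 0) : PvASt)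
        = pvAbs n (pvPhase2 n []) [] := by
      simp [pvAbs, pvPhase2, pvPad_nil n hn, pvPad0_nil n hn, pvHsum]
    set S := cc.foldl (pvBStep1 m) (([], [], 0) : PvB1St) with hS
    obtain ⟨hlen, hne, hcur0, hh⟩ := hinv
    simp only [paginate_cells, paginate_cells_alt]
    rw [habs0, heq, ← hS]
    simp only [pvPhase2_def]
    by_cases hc : S.2.1 = []
    · have hG : (pvPhase2 n S.1).2 = [] := hcur0 hc
      have h1 : pvAnyNonempty n (pvAbs n (pvPhase2 n S.1) S.2.1).2.1 = false := by
        simp only [pvAbs]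
        rw [pv_any_pad n _ _ hlen hne]
        simp [hG, hc]
      have hcb : S.2.1.isEmpty = true := by simp [hc]
      rw [h1, hcb]
      simp [pvAbs, hG]
    · have h1 : pvAnyNonempty n (pvAbs n (pvPhase2 n S.1) S.2.1).2.1 = true := by
        simp only [pvAbs]
        rw [pv_any_pad n _ _ hlen hne]
        simp [hc]
      have hcb : S.2.1.isEmpty = false := by simpa [List.isEmpty_iff] using hc
      rw [h1, hcb]
      simp only [pvAbs, Bool.false_eq_true, if_false, if_true]
      rw [pvMkPage_pad n _ (by simp; omega)]
      rw [pvPhase2_append n S.1 [(false, S.2.1)]]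
      simp only [List.foldl_cons, List.foldl_nil, pvBStep2]
      by_cases hfull : (((pvPhase2 n S.1).2.length : Int) + 1 = n)
      · simp [hfull]
      · simp [hfull]
  · have hcc : cc = [] := hpre.resolve_left hn
    subst hcc
    simp only [paginate_cells, paginate_cells_alt]
    simp [pv_any_replicate_nonempty]

theorem paginate_cells_spec : Claim_equal_paginate_cells := by
  intro cc m n _ hpre
  unfold Spec_paginate_cells
  exact pv_main cc m n hpre
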